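-- pv_equiv track=rewrite | github.com/rioanandaputra-bot/opensource-clipping | clipping/metadata.py | _looks_indonesian
-- ===== SOURCE A (Python) =====
-- def _normalize_spaces(text):
--     return " ".join(str(text or "").split()).strip()
--
-- def _looks_indonesian(text):
--     text = f" {_normalize_spaces(text).lower()} "
--     indikator = [
--         " yang ", " dan ", " untuk ", " dengan ", " karena ", " adalah ",
--         " bisa ", " tidak ", " lebih ", " dalam ", " pada ", " agar ",
--         " dari ", " ini ", " itu ", " juga ", " kalau ", " saat ",
--         " tentang ", " bikin ", " banget ", " jadi ", " sudah ",
--     ]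
--     return any(w in text for w in indikator)
-- ===== SOURCE B (Python) =====
-- _WORDS = frozenset(
--     "yang dan untuk dengan karena adalah bisa tidak lebih dalam pada agar "
--     "dari ini itu juga kalau saat tentang bikin banget jadi sudah".split()
-- )
--
-- def _looks_indonesian(text):
--     cur = []
--     for ch in str(text or "").lower() + " ":
--         if ch.isspace():
--             if cur and "".join(cur) in _WORDS:
--                 return True
--             cur = []
--         else:
--             cur.append(ch)
--     return False
-- ===== Notes on version B (the rewrite author's own statement) =====
-- stated objective: alternative
-- what changed: B replaces A's normalize-join-pad of the whole text followed by 23 separate padded-substring scans with a single character-level pass that accumulates each whitespace-delimited token and returns True as soon as one token is in the indicator word set.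
import Mathlib
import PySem

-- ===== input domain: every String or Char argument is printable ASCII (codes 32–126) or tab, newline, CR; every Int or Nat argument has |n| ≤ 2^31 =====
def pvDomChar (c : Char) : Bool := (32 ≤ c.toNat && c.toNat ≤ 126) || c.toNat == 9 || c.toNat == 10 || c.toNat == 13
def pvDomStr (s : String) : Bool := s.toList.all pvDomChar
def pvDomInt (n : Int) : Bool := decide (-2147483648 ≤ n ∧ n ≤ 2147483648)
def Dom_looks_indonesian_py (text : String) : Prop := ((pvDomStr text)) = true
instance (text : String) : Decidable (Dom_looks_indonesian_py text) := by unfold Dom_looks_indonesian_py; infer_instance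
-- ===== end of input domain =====

-- B replaces A's normalize-join-pad plus 23 padded-substring scans with a single
-- character-level pass that accumulates each token and checks it against a word set.

-- ===== PORT A =====
-- the 23 space-padded indicator substrings, exactly A's `indikator` list
def pvIndikator : List (List Char) :=
  [" yang ".toList, " dan ".toList, " untuk ".toList, " dengan ".toList, " karena ".toList,
   " adalah ".toList, " bisa ".toList, " tidak ".toList, " lebih ".toList, " dalam ".toList,
   " pada ".toList, " agar ".toList, " dari ".toList, " ini ".toList, " itu ".toList,
   " juga ".toList, " kalau ".toList, " saat ".toList, " tentang ".toList, " bikin ".toList,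
   " banget ".toList, " jadi ".toList, " sudah ".toList]

-- _normalize_spaces: " ".join(str(text or "").split()).strip(); for a str argument str(text or "") is text itself
def normalize_spaces_py (text : String) : List Char :=
  PySem.Chars.strip (PySem.Chars.join [' '] (PySem.Chars.split₀ text.toList))

def looks_indonesian_py (text : String) : Bool :=
  -- text = f" {_normalize_spaces(text).lower()} "
  let t : List Char := [' '] ++ PySem.Chars.lower (normalize_spaces_py text) ++ [' ']
  -- any(w in text for w in indikator)
  pvIndikator.any (fun w => PySem.Chars.isIn w t)

-- ===== PORT B =====
-- _WORDS = frozenset("yang dan … sudah".split())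
def pvAltWords : PySem.Set (List Char) :=
  PySem.Set.ofList (PySem.Chars.split₀
    ("yang dan untuk dengan karena adalah bisa tidak lebih dalam pada agar dari ini itu juga kalau saat tentang bikin banget jadi sudah").toList)

-- the for-loop: accumulate the current token `cur`; at whitespace, test it and reset
def pvScan : List Char → List Char → Bool
  | [], _ => false
  | c :: rest, cur =>
    if PySem.Chars.isspace c then
      -- if cur and "".join(cur) in _WORDS: return True; cur = []
      if (!cur.isEmpty) && PySem.Set.contains pvAltWords cur then true
      else pvScan rest []
    else pvScan rest (cur ++ [c])

def looks_indonesian_py_alt (text : String) : Bool :=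
  -- for ch in str(text or "").lower() + " ": …
  pvScan (PySem.Chars.lower text.toList ++ [' ']) []

-- ===== PRECONDITION & SPEC =====
def Spec_looks_indonesian_py (text : String) (out : Bool) : Prop := out = looks_indonesian_py_alt text
instance (text : String) (out : Bool) : Decidable (Spec_looks_indonesian_py text out) := by unfold Spec_looks_indonesian_py; infer_instance

-- ===== CLAIM (what is proved, stated in full; the proofs are below) =====
def Claim_equal_looks_indonesian_py : Prop := ∀ (text : String), Dom_looks_indonesian_py text → Spec_looks_indonesian_py text (looks_indonesian_py text)

-- ===== LEMMAS AND PROOFS =====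

-- a "word": what s.split() produces — nonempty and whitespace-free
def pvWord (w : List Char) : Prop := w ≠ [] ∧ ∀ c ∈ w, PySem.Chars.isspace c = false

-- lowercasing a character does not change whether it is whitespace
theorem pv_isspace_lowerChar (c : Char) :
    PySem.Chars.isspace (PySem.Chars.lowerChar c) = PySem.Chars.isspace c := by
  unfold PySem.Chars.lowerChar PySem.Chars.isupper
  split
  · rename_i h
    simp only [Bool.and_eq_true, decide_eq_true_eq] at h
    have h1 : 65 ≤ c.toNat := h.1
    have h2 : c.toNat ≤ 90 := h.2
    have hv : (Char.ofNat (c.toNat + 32)).toNat = c.toNat + 32 := by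
      rw [Char.toNat_ofNat, if_pos (Or.inl (by omega))]
    simp only [PySem.Chars.isspace, hv]
    rw [Bool.eq_iff_iff]
    simp only [Bool.or_eq_true, Bool.and_eq_true, decide_eq_true_eq]
    omega
  · rfl

-- the split₀ worker ignores the already-collected accumulator
theorem pv_go_acc (s cur : List Char) (acc : List (List Char)) :
    PySem.Chars.split₀.go s cur acc = acc.reverse ++ PySem.Chars.split₀.go s cur [] := by
  induction s generalizing cur acc with
  | nil =>
    simp only [PySem.Chars.split₀.go]
    by_cases h : cur.isEmpty <;> simp [h]
  | cons c rest ih =>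
    simp only [PySem.Chars.split₀.go]
    by_cases hc : PySem.Chars.isspace c
    · by_cases h : cur.isEmpty
      · simp only [hc, h, if_true]
        exact ih [] acc
      · simp only [hc, h, if_true, Bool.false_eq_true, if_false]
        rw [ih [] (cur.reverse :: acc), ih [] [cur.reverse]]
        simp
    · simp only [hc, Bool.false_eq_true, if_false]
      exact ih _ _

-- a whitespace-free run just extends the current token
theorem pv_go_word (w s cur : List Char) (acc : List (List Char))
    (hw : ∀ c ∈ w, PySem.Chars.isspace c = false) :
    PySem.Chars.split₀.go (w ++ s) cur acc = PySem.Chars.split₀.go s (w.reverse ++ cur) acc := by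
  induction w generalizing cur with
  | nil => simp
  | cons c w' ih =>
    have hc : PySem.Chars.isspace c = false := hw c (by simp)
    simp only [List.cons_append, PySem.Chars.split₀.go, hc, Bool.false_eq_true, if_false]
    rw [ih _ (fun d hd => hw d (by simp [hd]))]
    simp

-- split() of a single word is that word
theorem pv_split0_word (w : List Char) (hw : w ≠ []) (hsp : ∀ c ∈ w, PySem.Chars.isspace c = false) :
    PySem.Chars.split₀ w = [w] := by
  have := pv_go_word w [] [] [] hsp
  simp only [List.append_nil] at this
  unfold PySem.Chars.split₀
  rw [this]
  simp only [PySem.Chars.split₀.go]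
  simp [List.isEmpty_iff, hw]

-- a leading whitespace character is dropped by split()
theorem pv_split0_cons_space (c : Char) (s : List Char) (hc : PySem.Chars.isspace c = true) :
    PySem.Chars.split₀ (c :: s) = PySem.Chars.split₀ s := by
  unfold PySem.Chars.split₀
  simp [PySem.Chars.split₀.go, hc]

-- split() cuts cleanly at a space
theorem pv_split0_append_space (p u : List Char) :
    PySem.Chars.split₀ (p ++ ' ' :: u) = PySem.Chars.split₀ p ++ PySem.Chars.split₀ u := by
  unfold PySem.Chars.split₀
  suffices h : ∀ cur, PySem.Chars.split₀.go (p ++ ' ' :: u) cur [] =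
      PySem.Chars.split₀.go p cur [] ++ PySem.Chars.split₀.go u [] [] from h []
  induction p with
  | nil =>
    intro cur
    have hsp : PySem.Chars.isspace ' ' = true := by decide
    simp only [List.nil_append, PySem.Chars.split₀.go, hsp, if_true]
    by_cases h : cur.isEmpty
    · simp [h]
    · simp only [h, Bool.false_eq_true, if_false]
      rw [pv_go_acc u [] [cur.reverse]]
  | cons c p' ih =>
    intro cur
    by_cases hc : PySem.Chars.isspace c
    · by_cases h : cur.isEmpty
      · simp only [List.cons_append, PySem.Chars.split₀.go, hc, h, if_true]
        exact ih []
      · simp only [List.cons_append, PySem.Chars.split₀.go, hc, h, if_true, Bool.false_eq_true, if_false]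
        rw [pv_go_acc (p' ++ ' ' :: u) [] [cur.reverse], pv_go_acc p' [] [cur.reverse], ih []]
        simp
    · simp only [List.cons_append, PySem.Chars.split₀.go, hc, Bool.false_eq_true, if_false]
      exact ih _

-- every token split() produces is a word
theorem pv_go_tokens (s cur : List Char) (acc : List (List Char))
    (hacc : ∀ w ∈ acc, pvWord w) (hcur : ∀ c ∈ cur, PySem.Chars.isspace c = false) :
    ∀ w ∈ PySem.Chars.split₀.go s cur acc, pvWord w := by
  induction s generalizing cur acc with
  | nil =>
    simp only [PySem.Chars.split₀.go]
    by_cases h : cur.isEmpty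
    · simp only [h, if_true]
      intro w hw; exact hacc w (by simpa using hw)
    · simp only [h, Bool.false_eq_true, if_false]
      intro w hw
      simp only [List.mem_reverse, List.mem_cons] at hw
      rcases hw with h1 | h2
      · subst h1
        exact ⟨by simp [List.isEmpty_iff] at h; simp [h], fun c hc => hcur c (by simpa using hc)⟩
      · exact hacc w h2
  | cons c rest ih =>
    simp only [PySem.Chars.split₀.go]
    by_cases hc : PySem.Chars.isspace c
    · by_cases h : cur.isEmpty
      · simp only [hc, h, if_true]
        exact ih [] acc hacc (by simp)
      · simp only [hc, h, if_true, Bool.false_eq_true, if_false]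
        refine ih [] _ ?_ (by simp)
        intro w hw
        rcases List.mem_cons.mp hw with h1 | h2
        · subst h1
          exact ⟨by simp [List.isEmpty_iff] at h; simp [h], fun d hd => hcur d (by simpa using hd)⟩
        · exact hacc w h2
    · simp only [hc, Bool.false_eq_true, if_false]
      refine ih (c :: cur) acc hacc ?_
      intro d hd
      rcases List.mem_cons.mp hd with h1 | h2
      · subst h1; simpa using hc
      · exact hcur d h2

theorem pv_split0_tokens (t : List Char) : ∀ w ∈ PySem.Chars.split₀ t, pvWord w :=
  pv_go_tokens t [] [] (by simp) (by simp)

-- the split₀ worker commutes with lowercasing (whitespace is preserved by lowerChar)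
theorem pv_go_lower (s cur : List Char) (acc : List (List Char)) :
    PySem.Chars.split₀.go (s.map PySem.Chars.lowerChar) (cur.map PySem.Chars.lowerChar)
        (acc.map (List.map PySem.Chars.lowerChar))
      = (PySem.Chars.split₀.go s cur acc).map (List.map PySem.Chars.lowerChar) := by
  induction s generalizing cur acc with
  | nil =>
    simp only [List.map_nil, PySem.Chars.split₀.go]
    by_cases h : cur.isEmpty
    · simp [List.isEmpty_iff.mp h]
    · have : (cur.map PySem.Chars.lowerChar).isEmpty = false := by
        simp [List.isEmpty_iff] at h ⊢; exact h
      simp [h, this, List.map_reverse]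
  | cons c rest ih =>
    simp only [List.map_cons, PySem.Chars.split₀.go, pv_isspace_lowerChar]
    by_cases hc : PySem.Chars.isspace c
    · by_cases h : cur.isEmpty
      · have : (cur.map PySem.Chars.lowerChar).isEmpty = true := by
          simp [List.isEmpty_iff] at h ⊢; exact h
        simp only [hc, h, this, if_true]
        exact ih [] acc
      · have h2 : (cur.map PySem.Chars.lowerChar).isEmpty = false := by
          simp [List.isEmpty_iff] at h ⊢; exact h
        simp only [hc, h, h2, if_true, Bool.false_eq_true, if_false]
        have := ih [] (cur.reverse :: acc)
        simpa [List.map_reverse] using this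
    · simp only [hc, Bool.false_eq_true, if_false]
      exact ih (c :: cur) acc

-- split() commutes with lowercasing
theorem pv_split0_lower (t : List Char) :
    PySem.Chars.split₀ (PySem.Chars.lower t) = (PySem.Chars.split₀ t).map PySem.Chars.lower := by
  have := pv_go_lower t [] []
  simpa [PySem.Chars.split₀, PySem.Chars.lower] using this

-- join with " " over a cons
theorem pv_join_cons (w : List Char) (ws : List (List Char)) (h : ws ≠ []) :
    PySem.Chars.join [' '] (w :: ws) = w ++ ' ' :: PySem.Chars.join [' '] ws := by
  cases ws with
  | nil => exact absurd rfl h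
  | cons q rest => rw [PySem.Chars.join_cons_cons]; simp

-- the last character of a join of words is non-space
theorem pv_join_last (ws : List (List Char)) (hne : ws ≠ []) (h : ∀ w ∈ ws, pvWord w) :
    ∃ c r, PySem.Chars.join [' '] ws = r ++ [c] ∧ PySem.Chars.isspace c = false := by
  induction ws with
  | nil => exact absurd rfl hne
  | cons w rest ih =>
    cases rest with
    | nil =>
      obtain ⟨hw, hsp⟩ := h w (by simp)
      refine ⟨w.getLast hw, w.dropLast, ?_, hsp _ (List.getLast_mem hw)⟩
      rw [PySem.Chars.join_singleton]
      exact (List.dropLast_append_getLast hw).symm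
    | cons q rest' =>
      obtain ⟨c, r, hjoin, hc⟩ := ih (by simp) (fun v hv => h v (by simp [List.mem_cons] at hv ⊢; tauto))
      refine ⟨c, w ++ ' ' :: r, ?_, hc⟩
      rw [pv_join_cons w _ (by simp), hjoin]
      simp

-- the space-join of words has no leading/trailing whitespace, so strip is a no-op
theorem pv_strip_join (ws : List (List Char)) (h : ∀ w ∈ ws, pvWord w) :
    PySem.Chars.strip (PySem.Chars.join [' '] ws) = PySem.Chars.join [' '] ws := by
  cases hws : ws with
  | nil => simp [PySem.Chars.join_nil]; rfl
  | cons w rest =>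
    subst hws
    obtain ⟨hw, hsp⟩ := h w (by simp)
    obtain ⟨c0, w', hw0⟩ : ∃ c0 w', w = c0 :: w' := by
      cases w with | nil => exact absurd rfl hw | cons a b => exact ⟨a, b, rfl⟩
    have hjoin : ∃ u, PySem.Chars.join [' '] (w :: rest) = c0 :: u := by
      cases rest with
      | nil => exact ⟨w', by rw [PySem.Chars.join_singleton, hw0]⟩
      | cons q r' => exact ⟨w' ++ ' ' :: PySem.Chars.join [' '] (q :: r'),
          by rw [pv_join_cons w _ (by simp), hw0]; simp⟩
    obtain ⟨u, hu⟩ := hjoin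
    obtain ⟨cl, r, hlast, hcl⟩ := pv_join_last (w :: rest) (by simp) h
    unfold PySem.Chars.strip PySem.Chars.lstrip PySem.Chars.rstrip
    have hc0 : PySem.Chars.isspace c0 = false := hsp c0 (by simp [hw0])
    rw [hu, List.dropWhile_cons, hc0]
    simp only [Bool.false_eq_true, if_false]
    rw [← hu, hlast]
    simp [hcl]

-- lowercasing distributes over the space-join
theorem pv_lower_join (ws : List (List Char)) :
    PySem.Chars.lower (PySem.Chars.join [' '] ws) = PySem.Chars.join [' '] (ws.map PySem.Chars.lower) := by
  induction ws with
  | nil => simp [PySem.Chars.join_nil]; rfl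
  | cons w rest ih =>
    cases rest with
    | nil => simp [PySem.Chars.join_singleton]
    | cons q r' =>
      rw [pv_join_cons w _ (by simp), List.map_cons,
          pv_join_cons (PySem.Chars.lower w) _ (by simp), ← ih]
      simp only [PySem.Chars.lower, List.map_append, List.map_cons]
      rfl

-- tokens of the padded space-join are exactly ws
theorem pv_split0_padded (ws : List (List Char)) (h : ∀ w ∈ ws, pvWord w) :
    PySem.Chars.split₀ (' ' :: (PySem.Chars.join [' '] ws ++ [' '])) = ws := by
  rw [pv_split0_cons_space ' ' _ (by decide)]
  induction ws with
  | nil =>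
    rw [PySem.Chars.join_nil]
    simpa using pv_split0_cons_space ' ' [] (by decide)
  | cons w rest ih =>
    obtain ⟨hw, hsp⟩ := h w (by simp)
    cases rest with
    | nil =>
      rw [PySem.Chars.join_singleton]
      have : w ++ [' '] = w ++ ' ' :: [] := by simp
      rw [this, pv_split0_append_space w [], pv_split0_word w hw hsp]
      simp [PySem.Chars.split₀, PySem.Chars.split₀.go]
    | cons q r' =>
      rw [pv_join_cons w _ (by simp)]
      have : (w ++ ' ' :: PySem.Chars.join [' '] (q :: r')) ++ [' ']
           = w ++ ' ' :: (PySem.Chars.join [' '] (q :: r') ++ [' ']) := by simp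
      rw [this, pv_split0_append_space, pv_split0_word w hw hsp,
          ih (fun v hv => h v (by simp [List.mem_cons] at hv ⊢; tauto))]
      simp

-- v ∈ ws makes " v " an infix of the padded join
theorem pv_mem_infix (v : List Char) (ws : List (List Char)) (hv : v ∈ ws) :
    (' ' :: (v ++ [' '])) <:+: (' ' :: (PySem.Chars.join [' '] ws ++ [' '])) := by
  induction ws with
  | nil => simp at hv
  | cons w rest ih =>
    rcases List.mem_cons.mp hv with h1 | h2
    · subst h1
      cases rest with
      | nil => rw [PySem.Chars.join_singleton]
      | cons q r' =>
        rw [pv_join_cons v _ (by simp)]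
        exact List.IsPrefix.isInfix ⟨PySem.Chars.join [' '] (q :: r') ++ [' '], by simp⟩
    · have hinf := ih h2
      cases rest with
      | nil => simp at h2
      | cons q r' =>
        rw [pv_join_cons w _ (by simp)]
        have : ' ' :: ((w ++ ' ' :: PySem.Chars.join [' '] (q :: r')) ++ [' '])
             = (' ' :: w) ++ (' ' :: (PySem.Chars.join [' '] (q :: r') ++ [' '])) := by simp
        rw [this]
        exact hinf.trans (List.suffix_append _ _).isInfix

-- an occurrence of " v " makes v a token
theorem pv_infix_token (v t : List Char) (hv : pvWord v)
    (h : (' ' :: (v ++ [' '])) <:+: t) : v ∈ PySem.Chars.split₀ t := by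
  obtain ⟨s, u, hsu⟩ := h
  have : t = s ++ ' ' :: (v ++ ' ' :: u) := by rw [← hsu]; simp
  rw [this, pv_split0_append_space, pv_split0_append_space, pv_split0_word v hv.1 hv.2]
  simp

-- THE BRIDGE: " v " occurs in the padded join iff v is one of the joined words
theorem pv_isIn_padded (v : List Char) (ws : List (List Char))
    (hv : pvWord v) (h : ∀ w ∈ ws, pvWord w) :
    PySem.Chars.isIn (' ' :: (v ++ [' '])) (' ' :: (PySem.Chars.join [' '] ws ++ [' '])) = true ↔ v ∈ ws := by
  rw [PySem.Chars.isIn_iff_infix]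
  constructor
  · intro hinf
    have := pv_infix_token v _ hv hinf
    rwa [pv_split0_padded ws h] at this
  · exact pv_mem_infix v ws

-- A's padded substrings are exactly B's indicator words, space-padded
set_option maxRecDepth 10000 in
theorem pv_indikator_eq : pvIndikator = pvAltWords.map (fun w => ' ' :: (w ++ [' '])) := by decide

set_option maxRecDepth 10000 in
theorem pv_words_word : ∀ w ∈ pvAltWords, pvWord w := by
  have h : pvAltWords.all (fun w => !w.isEmpty && w.all (fun c => !PySem.Chars.isspace c)) = true := by decide
  intro w hw
  have := List.all_eq_true.mp h w hw
  simp only [Bool.and_eq_true, Bool.not_eq_eq_eq_not, Bool.not_true, List.isEmpty_eq_false_iff,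
    List.all_eq_true] at this
  exact ⟨this.1, fun c hc => by simpa using this.2 c hc⟩

-- B's scan over `cs + " "` finds a token in the word set iff split() of cs contains one
theorem pv_scan_spec (cs cur : List Char) :
    pvScan (cs ++ [' ']) cur
      = (PySem.Chars.split₀.go cs cur.reverse []).any (fun w => PySem.Set.contains pvAltWords w) := by
  induction cs generalizing cur with
  | nil =>
    have hsp : PySem.Chars.isspace ' ' = true := by decide
    simp only [List.nil_append, pvScan, hsp, if_true]
    by_cases h : cur.isEmpty
    · have : cur = [] := List.isEmpty_iff.mp h
      subst this
      simp [PySem.Chars.split₀.go]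
    · have h2 : cur.reverse.isEmpty = false := by
        simp [List.isEmpty_iff] at h ⊢; exact h
      simp only [PySem.Chars.split₀.go, h2, Bool.false_eq_true, if_false, h, Bool.not_false,
        Bool.true_and, List.reverse_nil, List.nil_append, List.reverse_cons, List.reverse_reverse]
      by_cases hcont : cur ∈ pvAltWords <;> simp [PySem.Set.contains, hcont]
  | cons c rest ih =>
    by_cases hc : PySem.Chars.isspace c
    · simp only [List.cons_append, pvScan, hc, if_true, PySem.Chars.split₀.go]
      by_cases h : cur.isEmpty
      · have hnil : cur = [] := List.isEmpty_iff.mp h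
        subst hnil
        simp only [List.reverse_nil, List.isEmpty_nil, if_true, Bool.not_true, Bool.false_and,
          Bool.false_eq_true, if_false]
        simpa using ih []
      · have h2 : cur.reverse.isEmpty = false := by
          simp [List.isEmpty_iff] at h ⊢; exact h
        simp only [h, h2, Bool.false_eq_true, if_false, Bool.not_false, Bool.true_and,
          List.reverse_reverse]
        rw [pv_go_acc rest [] [cur]]
        simp only [List.reverse_cons, List.reverse_nil, List.nil_append,
          List.any_append, List.any_cons, List.any_nil, Bool.or_false]
        rw [ih []]
        by_cases hm : cur ∈ pvAltWords <;> simp [PySem.Set.contains, hm]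
    · simp only [List.cons_append, pvScan, hc, Bool.false_eq_true, if_false,
        PySem.Chars.split₀.go]
      have : (cur ++ [c]).reverse = c :: cur.reverse := by simp
      rw [← this]
      exact ih (cur ++ [c])

theorem pv_main (text : String) : looks_indonesian_py text = looks_indonesian_py_alt text := by
  unfold looks_indonesian_py looks_indonesian_py_alt normalize_spaces_py
  simp only []
  set ws := PySem.Chars.split₀ text.toList with hws
  have htok : ∀ w ∈ ws, pvWord w := pv_split0_tokens _
  have htok' : ∀ w ∈ ws.map PySem.Chars.lower, pvWord w := by
    rw [← pv_split0_lower]; exact pv_split0_tokens _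
  rw [pv_strip_join ws htok, pv_lower_join ws]
  have hpad : [' '] ++ PySem.Chars.join [' '] (ws.map PySem.Chars.lower) ++ [' ']
      = ' ' :: (PySem.Chars.join [' '] (ws.map PySem.Chars.lower) ++ [' ']) := by simp
  rw [hpad, pv_indikator_eq, List.any_map]
  have hgo : PySem.Chars.split₀.go (PySem.Chars.lower text.toList) [] []
      = PySem.Chars.split₀ (PySem.Chars.lower text.toList) := rfl
  rw [pv_scan_spec (PySem.Chars.lower text.toList) [], List.reverse_nil, hgo,
    pv_split0_lower, ← hws]
  rw [Bool.eq_iff_iff]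
  simp only [List.any_eq_true, Function.comp]
  constructor
  · rintro ⟨w, hwmem, hwin⟩
    refine ⟨w, (pv_isIn_padded w _ (pv_words_word w hwmem) htok').mp hwin, ?_⟩
    simp [PySem.Set.contains, hwmem]
  · rintro ⟨x, hxmem, hxw⟩
    have hx : x ∈ pvAltWords := by
      simpa [PySem.Set.contains] using hxw
    exact ⟨x, hx, (pv_isIn_padded x _ (pv_words_word x hx) htok').mpr hxmem⟩

-- ===== VERDICT (by name: the statement is the Claim_ definition above) =====
theorem looks_indonesian_py_spec : Claim_equal_looks_indonesian_py := by
  intro text _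
  unfold Spec_looks_indonesian_py
  exact pv_main text
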